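-- pv_equiv track=rewrite | github.com/devatsecure/Argus-Security | scripts/vuln_deduplicator.py | _select_canonical
-- ===== SOURCE A (Python) =====
-- SCANNER_PRIORITY: list[str] = [
--     "trivy",
--     "semgrep",
--     "checkov",
--     "gitleaks",
--     "trufflehog",
-- ]
--
-- def _select_canonical(findings: list[dict]) -> dict:
--     """Pick the richest finding from a group of duplicates.
--
--     *Richest* means the finding with the most non-empty values.  Ties
--     are broken by scanner priority (trivy > semgrep > checkov > ...).
--     """
--
--     def _richness(f: dict) -> int:
--         return sum(1 for v in f.values() if v not in (None, "", [], {}))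
--
--     def _scanner_rank(f: dict) -> int:
--         scanner = str(f.get("scanner", f.get("source", ""))).lower()
--         try:
--             return SCANNER_PRIORITY.index(scanner)
--         except ValueError:
--             return len(SCANNER_PRIORITY)
--
--     # Sort: highest richness first, then lowest scanner rank
--     ranked = sorted(
--         findings,
--         key=lambda f: (-_richness(f), _scanner_rank(f)),
--     )
--     return ranked[0]
-- ===== SOURCE B (Python) =====
-- SCANNER_PRIORITY: list[str] = [
--     "trivy",
--     "semgrep",
--     "checkov",
--     "gitleaks",
--     "trufflehog",
-- ]
--
-- _RANK_OF = {s: i for i, s in enumerate(SCANNER_PRIORITY)}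
--
--
-- def _select_canonical(findings: list[dict]) -> dict:
--     """Pick the richest finding in one linear pass (no sort).
--
--     Key = (-richness, scanner rank); strict improvement only, so ties
--     keep the earliest finding, matching the stable sort's choice.
--     """
--
--     def _key(f: dict) -> tuple:
--         richness = sum(1 for v in f.values() if v not in (None, "", [], {}))
--         scanner = str(f.get("scanner", f.get("source", ""))).lower()
--         return (-richness, _RANK_OF.get(scanner, len(SCANNER_PRIORITY)))
--
--     best = findings[0]
--     best_key = _key(best)
--     for f in findings[1:]:
--         k = _key(f)
--         if k < best_key:
--             best, best_key = f, k
--     return best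
-- ===== Notes on version B (the rewrite author's own statement) =====
-- stated objective: alternative
-- what changed: Replaces sorting the whole group by (-richness, rank) and taking the first element with a single best-so-far linear pass (strict-improvement update, plus a precomputed scanner->rank dict instead of list.index with try/except); ties keep the earliest finding exactly as the stable sort does.
import Mathlib
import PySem

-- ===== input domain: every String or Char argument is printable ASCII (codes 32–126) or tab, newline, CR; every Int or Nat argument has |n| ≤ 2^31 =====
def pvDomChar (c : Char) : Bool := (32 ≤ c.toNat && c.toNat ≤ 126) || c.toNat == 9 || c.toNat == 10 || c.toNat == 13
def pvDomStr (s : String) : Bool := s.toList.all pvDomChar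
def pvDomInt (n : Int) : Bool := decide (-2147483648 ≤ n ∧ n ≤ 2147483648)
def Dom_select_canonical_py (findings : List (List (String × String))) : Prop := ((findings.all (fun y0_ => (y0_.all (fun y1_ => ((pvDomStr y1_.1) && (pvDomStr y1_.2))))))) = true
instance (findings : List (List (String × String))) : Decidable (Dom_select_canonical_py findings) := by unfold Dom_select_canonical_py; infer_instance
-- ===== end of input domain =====

-- B replaces A's full sort-then-take-first with one best-so-far linear pass (strict
-- improvement keeps the earliest finding, matching the stable sort); equivalence proved
-- on nonempty input (both raise IndexError on []).

-- ===== PORT A =====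
def pvScannerPriority : List String := ["trivy", "semgrep", "checkov", "gitleaks", "trufflehog"]

-- sum(1 for v in f.values() if v not in (None, "", [], {})); values are strings here
def pvRichA (f : List (String × String)) : Int :=
  ((PySem.Dict.mk f).values).foldl (fun acc v => if v ≠ "" then acc + 1 else acc) 0

-- str(f.get("scanner", f.get("source", ""))).lower(); try index except ValueError -> len
def pvRankA (f : List (String × String)) : Int :=
  let scanner := PySem.Str.lower ((PySem.Dict.mk f).getD "scanner" ((PySem.Dict.mk f).getD "source" ""))
  match PySem.List.index? pvScannerPriority scanner with
  | some i => (i : Int)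
  | none => (pvScannerPriority.length : Int)

def select_canonical_py (findings : List (List (String × String))) : List (String × String) :=
  let ranked := PySem.List.sorted2 findings (fun f => -(pvRichA f)) (fun f => pvRankA f)
  (PySem.List.pyGet? ranked 0).getD []   -- ranked[0]; Pre_ excludes the IndexError (empty) case

-- ===== PORT B =====
def pvRankOf : PySem.Dict String Int :=
  PySem.Dict.mk [("trivy", 0), ("semgrep", 1), ("checkov", 2), ("gitleaks", 3), ("trufflehog", 4)]

def pvKeyB (f : List (String × String)) : Int × Int :=
  (-(((PySem.Dict.mk f).values).foldl (fun acc v => if v ≠ "" then acc + 1 else acc) (0 : Int)),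
   pvRankOf.getD
     (PySem.Str.lower ((PySem.Dict.mk f).getD "scanner" ((PySem.Dict.mk f).getD "source" ""))) 5)

-- Python tuple '<' on a pair of ints (strict lexicographic)
def pvLtLex (a b : Int × Int) : Bool := a.1 < b.1 || (a.1 == b.1 && a.2 < b.2)

def select_canonical_py_alt (findings : List (List (String × String))) : List (String × String) :=
  match findings with
  | [] => []   -- findings[0] raises IndexError in B too; excluded by Pre_
  | f :: rest =>
    (rest.foldl (fun s g => let k := pvKeyB g; if pvLtLex k s.2 then (g, k) else s)
      (f, pvKeyB f)).1

-- ===== PRECONDITION & SPEC =====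
-- A raises IndexError on the empty list (ranked[0]); both programs raise there.
def Pre_select_canonical_py (findings : List (List (String × String))) : Prop := findings ≠ []
instance (findings : List (List (String × String))) : Decidable (Pre_select_canonical_py findings) := by unfold Pre_select_canonical_py; infer_instance
def pvWitness_select_canonical_py : (List (List (String × String))) := [[("scanner", "trivy"), ("id", "x")]]

def Spec_select_canonical_py (findings : List (List (String × String))) (out : List (String × String)) : Prop := out = select_canonical_py_alt findings
instance (findings : List (List (String × String))) (out : List (String × String)) : Decidable (Spec_select_canonical_py findings out) := by unfold Spec_select_canonical_py; infer_instance

-- ===== CLAIM (what is proved, stated in full; the proofs are below) =====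
def Claim_equal_select_canonical_py : Prop := ∀ (findings : List (List (String × String))), Dom_select_canonical_py findings → Pre_select_canonical_py findings → Spec_select_canonical_py findings (select_canonical_py findings)

-- ===== LEMMAS AND PROOFS =====

-- B's pair-state fold carries (best, key best)
theorem pvPairFold (rest : List (List (String × String))) (f : List (String × String)) :
    rest.foldl (fun s g => let k := pvKeyB g; if pvLtLex k s.2 then (g, k) else s) (f, pvKeyB f)
      = (rest.foldl (fun best g => if pvLtLex (pvKeyB g) (pvKeyB best) then g else best) f,
         pvKeyB (rest.foldl (fun best g => if pvLtLex (pvKeyB g) (pvKeyB best) then g else best) f)) := by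
  induction rest generalizing f with
  | nil => rfl
  | cons g rest ih =>
    simp only [List.foldl_cons]
    by_cases h : pvLtLex (pvKeyB g) (pvKeyB f) = true <;> simp [h, ih]

-- head of the insertion-sort fold is the strict-improvement running best
theorem pvInsertHead {α : Type} (before : α → α → Bool) (xs : List α) :
    ∀ (b : α) (t : List α), ∃ t',
      xs.foldl (fun acc g => PySem.List.insertBy before g acc) (b :: t)
        = (xs.foldl (fun best g => if before g best then g else best) b) :: t' := by
  induction xs with
  | nil => exact fun b t => ⟨t, rfl⟩
  | cons g xs ih =>
    intro b t
    simp only [List.foldl_cons, PySem.List.insertBy]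
    by_cases h : before g b = true
    · simp only [h, if_true]
      exact ih g (b :: t)
    · simp only [h, if_false, Bool.false_eq_true]
      exact ih b (PySem.List.insertBy before g t)

-- dict-of-ranks lookup = list.index with ValueError fallback, on the concrete priority list
theorem pvRank_eq (f : List (String × String)) : pvRankA f = (pvKeyB f).2 := by
  simp only [pvRankA, pvKeyB]
  generalize PySem.Str.lower ((PySem.Dict.mk f).getD "scanner" ((PySem.Dict.mk f).getD "source" "")) = s
  by_cases h1 : s = "trivy"
  · subst h1; decide
  by_cases h2 : s = "semgrep"
  · subst h2; decide
  by_cases h3 : s = "checkov"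
  · subst h3; decide
  by_cases h4 : s = "gitleaks"
  · subst h4; decide
  by_cases h5 : s = "trufflehog"
  · subst h5; decide
  have hn : PySem.List.index? pvScannerPriority s = none := by
    rw [PySem.List.index?_eq_none_iff]
    simp [pvScannerPriority, h1, h2, h3, h4, h5]
  rw [hn]
  simp [pvRankOf, PySem.Dict.getD, PySem.Dict.get?_mk_cons, pvScannerPriority, beq_iff_eq,
    Ne.symm h1, Ne.symm h2, Ne.symm h3, Ne.symm h4, Ne.symm h5]
  rfl

theorem pvRich_eq (f : List (String × String)) : -(pvRichA f) = (pvKeyB f).1 := by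
  unfold pvRichA pvKeyB; rfl

-- A's sorted2 comparator equals B's lexicographic test on the keys
theorem pvBefore_eq (g b : List (String × String)) :
    (decide (-pvRichA g < -pvRichA b)
      || (!decide (-pvRichA b < -pvRichA g) && decide (pvRankA g < pvRankA b)))
      = pvLtLex (pvKeyB g) (pvKeyB b) := by
  rw [pvRank_eq, pvRank_eq]
  have hg := pvRich_eq g
  have hb := pvRich_eq b
  simp only [pvLtLex, ← hg, ← hb]
  rcases lt_trichotomy (-(pvRichA g)) (-(pvRichA b)) with h | h | h <;>
    simp [h] <;> omega

theorem pvGetZero {α : Type} (m : α) (t : List α) : PySem.List.pyGet? (m :: t) 0 = some m := by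
  simp [PySem.List.pyGet?, PySem.List.pyIdx?]

-- ===== VERDICT (by name: the statement is the Claim_ definition above) =====
theorem select_canonical_py_spec : Claim_equal_select_canonical_py := by
  intro findings _ hpre
  unfold Spec_select_canonical_py select_canonical_py select_canonical_py_alt
  match findings with
  | [] => exact absurd rfl hpre
  | f :: rest =>
    simp only [PySem.List.sorted2, Bool.false_eq_true, if_false, List.foldl_cons, pvPairFold]
    obtain ⟨t', ht⟩ := pvInsertHead
      (fun a b => decide (-pvRichA a < -pvRichA b)
        || (!decide (-pvRichA b < -pvRichA a) && decide (pvRankA a < pvRankA b)))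
      rest f ([] : List (List (String × String)))
    rw [show PySem.List.insertBy
        (fun a b => decide (-pvRichA a < -pvRichA b)
          || (!decide (-pvRichA b < -pvRichA a) && decide (pvRankA a < pvRankA b))) f [] = [f]
      from rfl, ht]
    simp only [pvGetZero, Option.getD_some]
    apply PySem.List.foldl_congr_mem
    intro acc x _
    rw [pvBefore_eq]
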